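-- pv_equiv track=rewrite | github.com/briancl2/repo-optimizer | scripts/evaluate-advisory-transfer.py | summarize_capability_state
-- ===== SOURCE A (Python) =====
-- from typing import Any
--
-- def summarize_capability_state(rows: list[dict[str, Any]], transfer_state: str) -> str:
--     states = {str(row.get("capability_state") or "").strip() for row in rows}
--     states.discard("")
--     if transfer_state == "ready" or "reusable" in states:
--         return "reusable"
--     if states == {"helper_only"}:
--         return "helper_only"
--     return "bounded_calibrated"
-- ===== SOURCE B (Python) =====
-- def summarize_capability_state(rows, transfer_state):
--     if transfer_state == "ready":
--         return "reusable"
--     seen_helper = False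
--     for i, row in enumerate(rows):
--         v = str(row.get("capability_state") or "").strip()
--         if v == "reusable":
--             return "reusable"
--         if v == "helper_only":
--             seen_helper = True
--         elif v != "":
--             # a disqualifying state was seen: only a later 'reusable' can still matter
--             for later in rows[i + 1:]:
--                 if str(later.get("capability_state") or "").strip() == "reusable":
--                     return "reusable"
--             return "bounded_calibrated"
--     return "helper_only" if seen_helper else "bounded_calibrated"
-- ===== Notes on version B (the rewrite author's own statement) =====
-- stated objective: alternative
-- what changed: Replaces A's whole-list set materialization (comprehension, discard, membership and set-equality tests) with an early-exit two-phase state machine: it returns immediately on transfer_state=='ready' or the first reusable row, and on the first disqualifying state it de-escalates to a narrower scan of the remaining rows that only looks for 'reusable'.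
import Mathlib
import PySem

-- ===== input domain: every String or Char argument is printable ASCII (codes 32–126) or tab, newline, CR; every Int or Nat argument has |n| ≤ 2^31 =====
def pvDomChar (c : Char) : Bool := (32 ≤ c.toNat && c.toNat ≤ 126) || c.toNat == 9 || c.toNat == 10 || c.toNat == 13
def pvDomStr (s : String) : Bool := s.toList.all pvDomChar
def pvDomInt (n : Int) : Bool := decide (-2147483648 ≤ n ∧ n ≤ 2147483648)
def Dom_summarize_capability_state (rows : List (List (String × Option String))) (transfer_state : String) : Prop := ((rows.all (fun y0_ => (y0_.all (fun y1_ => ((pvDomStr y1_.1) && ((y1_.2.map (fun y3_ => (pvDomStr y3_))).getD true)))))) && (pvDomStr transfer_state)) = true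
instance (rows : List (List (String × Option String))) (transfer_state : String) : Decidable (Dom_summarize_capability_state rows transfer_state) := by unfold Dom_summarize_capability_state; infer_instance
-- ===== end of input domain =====

-- B replaces A's whole-list set materialization with an early-exit two-phase state
-- machine (objective: alternative, same asymptotic cost).

-- str(row.get("capability_state") or "").strip()  (value None or "" both normalize to "")
def pvCapState (row : List (String × Option String)) : String :=
  PySem.Str.strip (((row.lookup "capability_state").getD none).getD "")

-- ===== PORT A =====
def summarize_capability_state (rows : List (List (String × Option String))) (transfer_state : String) : String :=
  let states := PySem.Set.discard (PySem.Set.ofList (rows.map pvCapState)) ""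
  if transfer_state == "ready" || PySem.Set.contains states "reusable" then "reusable"
  else if PySem.Set.equal states (PySem.Set.ofList ["helper_only"]) then "helper_only"
  else "bounded_calibrated"

-- ===== PORT B =====
-- phase 2: after a disqualifying state, only a later "reusable" matters
def pvScanReusable : List (List (String × Option String)) → String
  | [] => "bounded_calibrated"
  | r :: rs => if pvCapState r == "reusable" then "reusable" else pvScanReusable rs

-- phase 1: early exit on "reusable", remember "helper_only", de-escalate on other
def pvScan : List (List (String × Option String)) → Bool → String
  | [], seenHelper => if seenHelper then "helper_only" else "bounded_calibrated"
  | r :: rs, seenHelper =>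
    let v := pvCapState r
    if v == "reusable" then "reusable"
    else if v == "helper_only" then pvScan rs true
    else if v != "" then pvScanReusable rs
    else pvScan rs seenHelper

def summarize_capability_state_alt (rows : List (List (String × Option String))) (transfer_state : String) : String :=
  if transfer_state == "ready" then "reusable" else pvScan rows false

-- ===== PRECONDITION & SPEC =====
def Spec_summarize_capability_state (rows : List (List (String × Option String))) (transfer_state : String) (out : String) : Prop := out = summarize_capability_state_alt rows transfer_state
instance (rows : List (List (String × Option String))) (transfer_state : String) (out : String) : Decidable (Spec_summarize_capability_state rows transfer_state out) := by unfold Spec_summarize_capability_state; infer_instance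

-- ===== CLAIM (what is proved, stated in full; the proofs are below) =====
def Claim_equal_summarize_capability_state : Prop := ∀ (rows : List (List (String × Option String))) (transfer_state : String), Dom_summarize_capability_state rows transfer_state → Spec_summarize_capability_state rows transfer_state (summarize_capability_state rows transfer_state)

-- ===== LEMMAS AND PROOFS =====

theorem pvScanReusable_char (rows : List (List (String × Option String))) :
    pvScanReusable rows =
      if (rows.map pvCapState).any (· == "reusable") then "reusable" else "bounded_calibrated" := by
  induction rows with
  | nil => simp [pvScanReusable]
  | cons r rs ih =>
    simp only [pvScanReusable, List.map_cons, List.any_cons]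
    by_cases h : pvCapState r = "reusable"
    · simp [h]
    · simp [h, ih]

theorem pvScan_char (rows : List (List (String × Option String))) (h : Bool) :
    pvScan rows h =
      if (rows.map pvCapState).any (· == "reusable") then "reusable"
      else if (rows.map pvCapState).any (fun v => v != "" && v != "reusable" && v != "helper_only") then "bounded_calibrated"
      else if h || (rows.map pvCapState).any (· == "helper_only") then "helper_only"
      else "bounded_calibrated" := by
  induction rows generalizing h with
  | nil => simp [pvScan]
  | cons r rs ih =>
    simp only [pvScan, List.map_cons, List.any_cons]
    by_cases h1 : pvCapState r = "reusable"
    · simp [h1]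
    · by_cases h2 : pvCapState r = "helper_only"
      · simp [h2, ih]
      · by_cases h3 : pvCapState r = ""
        · simp [h3, ih]
        · have e3 : (pvCapState r != "") = true := by simp [h3]
          simp only [h1, h2, e3, beq_iff_eq, if_false, if_true,
            pvScanReusable_char, ih]
          have ho : (pvCapState r != "" && pvCapState r != "reusable" && pvCapState r != "helper_only") = true := by
            simp [h1, h2, h3]
          by_cases hr : ∃ x ∈ rs, pvCapState x = "reusable"
          · simp [hr]
          · simp [hr, h1]
            intro hc
            exact absurd hc h2

-- ===== VERDICT (by name: the statement is the Claim_ definition above) =====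
theorem summarize_capability_state_spec : Claim_equal_summarize_capability_state := by
  intro rows ts _
  unfold Spec_summarize_capability_state summarize_capability_state summarize_capability_state_alt
  rw [pvScan_char]
  set L := rows.map pvCapState with hL
  simp only [Bool.false_or]
  have hR : PySem.Set.contains (PySem.Set.discard (PySem.Set.ofList L) "") "reusable"
      = L.any (· == "reusable") := by
    rw [Bool.eq_iff_iff, PySem.Set.contains_iff, List.any_eq_true]
    rw [PySem.Set.mem_discard, PySem.Set.mem_ofList]
    constructor
    · rintro ⟨hm, -⟩; exact ⟨_, hm, by simp⟩
    · rintro ⟨x, hx, he⟩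
      rw [beq_iff_eq] at he; subst he
      exact ⟨hx, by decide⟩
  rw [hR]
  by_cases hts : ts = "ready"
  · subst hts; simp
  · have hts' : (ts == "ready") = false := by simp [hts]
    rw [hts']
    simp only [Bool.false_or]
    by_cases hRe : L.any (· == "reusable") = true
    · simp [hRe]
    · rw [Bool.not_eq_true] at hRe
      rw [hRe]
      simp only [Bool.false_eq_true, if_false]
      have hnoR' : ∀ x ∈ L, x ≠ "reusable" := by
        have h := hRe
        rw [List.any_eq_false] at h
        intro x hx
        simpa using h x hx
      have hE : PySem.Set.equal (PySem.Set.discard (PySem.Set.ofList L) "") (PySem.Set.ofList ["helper_only"])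
          = (L.any (· == "helper_only") && !(L.any (fun v => v != "" && v != "reusable" && v != "helper_only"))) := by
        rw [Bool.eq_iff_iff, PySem.Set.equal_iff]
        constructor
        · intro hc
          have hh : "helper_only" ∈ L := by
            have := (hc "helper_only").2 (by rw [PySem.Set.mem_ofList]; simp)
            rw [PySem.Set.mem_discard, PySem.Set.mem_ofList] at this
            exact this.1
          rw [Bool.and_eq_true, List.any_eq_true, Bool.not_eq_true', List.any_eq_false]
          refine ⟨⟨_, hh, by simp⟩, ?_⟩
          intro x hx
          by_cases hxe : x = ""
          · simp [hxe]
          · have := (hc x).1 (by rw [PySem.Set.mem_discard, PySem.Set.mem_ofList]; exact ⟨hx, hxe⟩)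
            rw [PySem.Set.mem_ofList, List.mem_singleton] at this
            simp [this]
        · rw [Bool.and_eq_true, List.any_eq_true, Bool.not_eq_true', List.any_eq_false]
          rintro ⟨⟨y, hy, hye⟩, hno⟩
          rw [beq_iff_eq] at hye; subst hye
          intro x
          rw [PySem.Set.mem_discard, PySem.Set.mem_ofList, PySem.Set.mem_ofList, List.mem_singleton]
          constructor
          · rintro ⟨hxm, hxe⟩
            by_contra hne
            exact hno x hxm (by simp [hxe, hnoR' x hxm, hne])
          · rintro rfl; exact ⟨hy, by decide⟩
      rw [hE]
      by_cases hO : L.any (fun v => v != "" && v != "reusable" && v != "helper_only") = true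
      · simp [hO]
      · rw [Bool.not_eq_true] at hO
        by_cases hH : L.any (· == "helper_only") = true
        · simp [hO, hH]
        · rw [Bool.not_eq_true] at hH
          simp [hO, hH]
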